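-- pv_equiv track=rewrite | github.com/vedik2002/prefvlm | prefvlm/data/chartqa.py | _infer_chart_type
-- ===== SOURCE A (Python) =====
-- def _infer_chart_type(question: str, answer: str) -> str:
--     """Rough heuristic for chart type from question text."""
--     q = (question + " " + answer).lower()
--     if any(w in q for w in ["bar", "bars", "bar chart"]):
--         return "bar"
--     if any(w in q for w in ["line", "lines", "line chart", "time series"]):
--         return "line"
--     if any(w in q for w in ["pie", "donut", "proportion", "percentage breakdown"]):
--         return "pie"
--     if any(w in q for w in ["scatter", "correlation", "plot"]):
--         return "scatter"
--     if any(w in q for w in ["table", "row", "column", "cell"]):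
--         return "table"
--     return "unknown"
-- ===== SOURCE B (Python) =====
-- _KEYWORDS = [
--     ("bar", "bar"),
--     ("line", "line"), ("time series", "line"),
--     ("pie", "pie"), ("donut", "pie"), ("proportion", "pie"), ("percentage breakdown", "pie"),
--     ("scatter", "scatter"), ("correlation", "scatter"), ("plot", "scatter"),
--     ("table", "table"), ("row", "table"), ("column", "table"), ("cell", "table"),
-- ]
-- _PRIORITY = ["bar", "line", "pie", "scatter", "table"]
--
--
-- def _infer_chart_type(question: str, answer: str) -> str:
--     q = (question + " " + answer).lower()
--     hits = {label for kw, label in _KEYWORDS if kw in q}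
--     for label in _PRIORITY:
--         if label in hits:
--             return label
--     return "unknown"
-- ===== Notes on version B (the rewrite author's own statement) =====
-- stated objective: idiomatic
-- what changed: Replaces the hard-coded if-chain of any(...) tests by a data-driven keyword->label table (redundant keywords that contain another keyword of the same label, e.g. 'bars'/'bar chart', dropped): B collects the set of matched labels in one scan of the table and returns the first label in the fixed priority order, 'unknown' if none.
import Mathlib
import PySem

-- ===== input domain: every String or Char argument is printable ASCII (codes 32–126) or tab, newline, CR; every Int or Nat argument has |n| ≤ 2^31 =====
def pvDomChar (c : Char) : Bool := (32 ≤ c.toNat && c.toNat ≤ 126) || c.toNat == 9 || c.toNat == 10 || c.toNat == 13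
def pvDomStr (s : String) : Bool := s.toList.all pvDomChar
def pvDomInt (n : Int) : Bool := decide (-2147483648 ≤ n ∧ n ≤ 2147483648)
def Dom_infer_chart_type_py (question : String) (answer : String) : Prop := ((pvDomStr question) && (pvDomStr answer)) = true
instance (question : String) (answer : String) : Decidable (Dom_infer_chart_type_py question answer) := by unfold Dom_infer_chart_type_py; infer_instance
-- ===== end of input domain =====

-- B replaces A's hard-coded if-chain by a data-driven keyword table (redundant keywords
-- such as "bars"/"bar chart" dropped as substrings of "bar"): collect the set of matched
-- labels, then return the first label in priority order; objective: idiomatic.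


-- ===== PORT A =====
def infer_chart_type_py (question : String) (answer : String) : String :=
  let q := PySem.Str.lower (String.ofList (question.toList ++ ' ' :: answer.toList))
  if ["bar", "bars", "bar chart"].any (fun w => PySem.Str.isIn w q) then "bar"
  else if ["line", "lines", "line chart", "time series"].any (fun w => PySem.Str.isIn w q) then "line"
  else if ["pie", "donut", "proportion", "percentage breakdown"].any (fun w => PySem.Str.isIn w q) then "pie"
  else if ["scatter", "correlation", "plot"].any (fun w => PySem.Str.isIn w q) then "scatter"
  else if ["table", "row", "column", "cell"].any (fun w => PySem.Str.isIn w q) then "table"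
  else "unknown"

-- ===== PORT B =====
def pvKeywords : List (String × String) :=
  [("bar", "bar"),
   ("line", "line"), ("time series", "line"),
   ("pie", "pie"), ("donut", "pie"), ("proportion", "pie"), ("percentage breakdown", "pie"),
   ("scatter", "scatter"), ("correlation", "scatter"), ("plot", "scatter"),
   ("table", "table"), ("row", "table"), ("column", "table"), ("cell", "table")]

def pvPriority : List String := ["bar", "line", "pie", "scatter", "table"]

def infer_chart_type_py_alt (question : String) (answer : String) : String :=
  let q := PySem.Str.lower (String.ofList (question.toList ++ ' ' :: answer.toList))
  let hits : PySem.Set String :=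
    PySem.Set.ofList ((pvKeywords.filter (fun p => PySem.Str.isIn p.1 q)).map (·.2))
  match pvPriority.find? (fun label => PySem.Set.contains hits label) with
  | some label => label
  | none => "unknown"

-- ===== PRECONDITION & SPEC =====
def Spec_infer_chart_type_py (question : String) (answer : String) (out : String) : Prop := out = infer_chart_type_py_alt question answer
instance (question : String) (answer : String) (out : String) : Decidable (Spec_infer_chart_type_py question answer out) := by unfold Spec_infer_chart_type_py; infer_instance

-- ===== CLAIM (what is proved, stated in full; the proofs are below) =====
def Claim_equal_infer_chart_type_py : Prop := ∀ (question : String) (answer : String), Dom_infer_chart_type_py question answer → Spec_infer_chart_type_py question answer (infer_chart_type_py question answer)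

-- ===== LEMMAS AND PROOFS =====

-- a substring keyword occurs wherever a longer keyword containing it occurs
theorem pvNotSup (sub sup ql : List Char) (h : sub <:+: sup)
    (hn : PySem.Chars.isIn sub ql = false) : PySem.Chars.isIn sup ql = false := by
  cases hs : PySem.Chars.isIn sup ql
  · rfl
  · exfalso
    rw [PySem.Chars.isIn_iff_infix] at hs
    have hx : PySem.Chars.isIn sub ql = true := by
      rw [PySem.Chars.isIn_iff_infix]; exact h.trans hs
    rw [hx] at hn; cases hn

-- membership in the mapped filter of a keyword table, as a Bool scan of the table
theorem pvMemFilterMap (f : String × String → Bool) (kws : List (String × String)) (lbl : String) :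
    lbl ∈ (kws.filter f).map (·.2) ↔ (kws.any fun p => (lbl == p.2) && f p) = true := by
  induction kws with
  | nil => simp
  | cons a t ih =>
    simp only [List.filter_cons]
    cases hf : f a
    · simp [hf, ih]
    · simp [hf, ih, List.mem_cons]

theorem pvMem_iff (ql : List Char) (lbl : String) :
    lbl ∈ PySem.Set.ofList ((pvKeywords.filter (fun p => PySem.Chars.isIn p.1.toList ql)).map (·.2))
    ↔ (pvKeywords.any fun p => (lbl == p.2) && PySem.Chars.isIn p.1.toList ql) = true := by
  rw [PySem.Set.mem_ofList]; exact pvMemFilterMap _ _ _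

theorem pvMemC_bar (ql : List Char) :
    ("bar" : String) ∈ PySem.Set.ofList ((pvKeywords.filter (fun p => PySem.Chars.isIn p.1.toList ql)).map (·.2))
    ↔ PySem.Chars.isIn ['b','a','r'] ql = true := by
  rw [pvMem_iff]; simp [pvKeywords]

theorem pvMemC_line (ql : List Char) :
    ("line" : String) ∈ PySem.Set.ofList ((pvKeywords.filter (fun p => PySem.Chars.isIn p.1.toList ql)).map (·.2))
    ↔ (PySem.Chars.isIn ['l','i','n','e'] ql = true ∨
       PySem.Chars.isIn ['t','i','m','e',' ','s','e','r','i','e','s'] ql = true) := by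
  rw [pvMem_iff]; simp [pvKeywords]

theorem pvMemC_pie (ql : List Char) :
    ("pie" : String) ∈ PySem.Set.ofList ((pvKeywords.filter (fun p => PySem.Chars.isIn p.1.toList ql)).map (·.2))
    ↔ (PySem.Chars.isIn ['p','i','e'] ql = true ∨
       PySem.Chars.isIn ['d','o','n','u','t'] ql = true ∨
       PySem.Chars.isIn ['p','r','o','p','o','r','t','i','o','n'] ql = true ∨
       PySem.Chars.isIn ['p','e','r','c','e','n','t','a','g','e',' ','b','r','e','a','k','d','o','w','n'] ql = true) := by
  rw [pvMem_iff]; simp [pvKeywords]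

theorem pvMemC_scatter (ql : List Char) :
    ("scatter" : String) ∈ PySem.Set.ofList ((pvKeywords.filter (fun p => PySem.Chars.isIn p.1.toList ql)).map (·.2))
    ↔ (PySem.Chars.isIn ['s','c','a','t','t','e','r'] ql = true ∨
       PySem.Chars.isIn ['c','o','r','r','e','l','a','t','i','o','n'] ql = true ∨
       PySem.Chars.isIn ['p','l','o','t'] ql = true) := by
  rw [pvMem_iff]; simp [pvKeywords]

theorem pvMemC_table (ql : List Char) :
    ("table" : String) ∈ PySem.Set.ofList ((pvKeywords.filter (fun p => PySem.Chars.isIn p.1.toList ql)).map (·.2))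
    ↔ (PySem.Chars.isIn ['t','a','b','l','e'] ql = true ∨
       PySem.Chars.isIn ['r','o','w'] ql = true ∨
       PySem.Chars.isIn ['c','o','l','u','m','n'] ql = true ∨
       PySem.Chars.isIn ['c','e','l','l'] ql = true) := by
  rw [pvMem_iff]; simp [pvKeywords]

set_option maxHeartbeats 1600000 in
theorem pvBody_eq (q : String) :
    (if ["bar", "bars", "bar chart"].any (fun w => PySem.Str.isIn w q) then "bar"
     else if ["line", "lines", "line chart", "time series"].any (fun w => PySem.Str.isIn w q) then "line"
     else if ["pie", "donut", "proportion", "percentage breakdown"].any (fun w => PySem.Str.isIn w q) then "pie"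
     else if ["scatter", "correlation", "plot"].any (fun w => PySem.Str.isIn w q) then "scatter"
     else if ["table", "row", "column", "cell"].any (fun w => PySem.Str.isIn w q) then "table"
     else "unknown")
    = (match pvPriority.find? (fun label =>
          PySem.Set.contains
            (PySem.Set.ofList ((pvKeywords.filter (fun p => PySem.Str.isIn p.1 q)).map (·.2))) label) with
       | some label => label
       | none => "unknown") := by
  simp [pvPriority, List.find?]
  by_cases hbar : PySem.Chars.isIn ['b','a','r'] q.toList = true
  · simp [hbar, (pvMemC_bar q.toList).mpr hbar]
  · simp only [Bool.not_eq_true] at hbar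
    have hbars := pvNotSup _ ['b','a','r','s'] q.toList (by decide) hbar
    have hbarchart := pvNotSup _ ['b','a','r',' ','c','h','a','r','t'] q.toList (by decide) hbar
    have c1 : ¬ ("bar" : String) ∈ PySem.Set.ofList
        ((pvKeywords.filter (fun p => PySem.Chars.isIn p.1.toList q.toList)).map (·.2)) := by
      intro hm; have h := (pvMemC_bar q.toList).mp hm; rw [h] at hbar; cases hbar
    by_cases hl : PySem.Chars.isIn ['l','i','n','e'] q.toList = true ∨
        PySem.Chars.isIn ['t','i','m','e',' ','s','e','r','i','e','s'] q.toList = true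
    · have c2 := (pvMemC_line q.toList).mpr hl
      rcases hl with h | h <;> simp [hbar, hbars, hbarchart, c1, c2, h]
    · push_neg at hl
      obtain ⟨hline, hts⟩ := hl
      simp only [Bool.not_eq_true] at hline hts
      have hlines := pvNotSup _ ['l','i','n','e','s'] q.toList (by decide) hline
      have hlinechart := pvNotSup _ ['l','i','n','e',' ','c','h','a','r','t'] q.toList (by decide) hline
      have c2 : ¬ ("line" : String) ∈ PySem.Set.ofList
          ((pvKeywords.filter (fun p => PySem.Chars.isIn p.1.toList q.toList)).map (·.2)) := by
        intro hm
        rcases (pvMemC_line q.toList).mp hm with h | h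
        · rw [h] at hline; cases hline
        · rw [h] at hts; cases hts
      by_cases hp : PySem.Chars.isIn ['p','i','e'] q.toList = true ∨
          PySem.Chars.isIn ['d','o','n','u','t'] q.toList = true ∨
          PySem.Chars.isIn ['p','r','o','p','o','r','t','i','o','n'] q.toList = true ∨
          PySem.Chars.isIn ['p','e','r','c','e','n','t','a','g','e',' ','b','r','e','a','k','d','o','w','n'] q.toList = true
      · have c3 := (pvMemC_pie q.toList).mpr hp
        rcases hp with h | h | h | h <;>
          simp [hbar, hbars, hbarchart, hline, hts, hlines, hlinechart, c1, c2, c3, h]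
      · push_neg at hp
        obtain ⟨hpie, hdonut, hprop, hperc⟩ := hp
        simp only [Bool.not_eq_true] at hpie hdonut hprop hperc
        have c3 : ¬ ("pie" : String) ∈ PySem.Set.ofList
            ((pvKeywords.filter (fun p => PySem.Chars.isIn p.1.toList q.toList)).map (·.2)) := by
          intro hm
          rcases (pvMemC_pie q.toList).mp hm with h | h | h | h
          · rw [h] at hpie; cases hpie
          · rw [h] at hdonut; cases hdonut
          · rw [h] at hprop; cases hprop
          · rw [h] at hperc; cases hperc
        by_cases hs : PySem.Chars.isIn ['s','c','a','t','t','e','r'] q.toList = true ∨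
            PySem.Chars.isIn ['c','o','r','r','e','l','a','t','i','o','n'] q.toList = true ∨
            PySem.Chars.isIn ['p','l','o','t'] q.toList = true
        · have c4 := (pvMemC_scatter q.toList).mpr hs
          rcases hs with h | h | h <;>
            simp [hbar, hbars, hbarchart, hline, hts, hlines, hlinechart, hpie, hdonut, hprop,
              hperc, c1, c2, c3, c4, h]
        · push_neg at hs
          obtain ⟨hsc, hcorr, hplot⟩ := hs
          simp only [Bool.not_eq_true] at hsc hcorr hplot
          have c4 : ¬ ("scatter" : String) ∈ PySem.Set.ofList
              ((pvKeywords.filter (fun p => PySem.Chars.isIn p.1.toList q.toList)).map (·.2)) := by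
            intro hm
            rcases (pvMemC_scatter q.toList).mp hm with h | h | h
            · rw [h] at hsc; cases hsc
            · rw [h] at hcorr; cases hcorr
            · rw [h] at hplot; cases hplot
          by_cases ht : PySem.Chars.isIn ['t','a','b','l','e'] q.toList = true ∨
              PySem.Chars.isIn ['r','o','w'] q.toList = true ∨
              PySem.Chars.isIn ['c','o','l','u','m','n'] q.toList = true ∨
              PySem.Chars.isIn ['c','e','l','l'] q.toList = true
          · have c5 := (pvMemC_table q.toList).mpr ht
            rcases ht with h | h | h | h <;>
              simp [hbar, hbars, hbarchart, hline, hts, hlines, hlinechart, hpie, hdonut, hprop,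
                hperc, hsc, hcorr, hplot, c1, c2, c3, c4, c5, h]
          · push_neg at ht
            obtain ⟨htab, hrow, hcol, hcell⟩ := ht
            simp only [Bool.not_eq_true] at htab hrow hcol hcell
            have c5 : ¬ ("table" : String) ∈ PySem.Set.ofList
                ((pvKeywords.filter (fun p => PySem.Chars.isIn p.1.toList q.toList)).map (·.2)) := by
              intro hm
              rcases (pvMemC_table q.toList).mp hm with h | h | h | h
              · rw [h] at htab; cases htab
              · rw [h] at hrow; cases hrow
              · rw [h] at hcol; cases hcol
              · rw [h] at hcell; cases hcell
            simp [hbar, hbars, hbarchart, hline, hts, hlines, hlinechart, hpie, hdonut, hprop,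
              hperc, hsc, hcorr, hplot, htab, hrow, hcol, hcell, c1, c2, c3, c4, c5]

-- ===== VERDICT (by name: the statement is the Claim_ definition above) =====
theorem infer_chart_type_py_spec : Claim_equal_infer_chart_type_py := by
  intro question answer _
  unfold Spec_infer_chart_type_py infer_chart_type_py infer_chart_type_py_alt
  generalize PySem.Str.lower (String.ofList (question.toList ++ ' ' :: answer.toList)) = q
  exact pvBody_eq q
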